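-- pv_equiv track=rewrite | github.com/CodeProgress/DataAnalysis | optimalStopping.py | pick_val_after_N_new_bests
-- ===== SOURCE A (Python) =====
-- def pick_val_after_N_new_bests(values, stoppingPoint, numNewBestsToStopAfter):
--     """
--     Same as pick_val except when higher number is found, use it as the new best
--     and keep iterating until you find something higher.
--     """
--     bestsSoFar = [values[0]]
--     for i, value in enumerate(values):
--         if i < stoppingPoint and value > bestsSoFar[0]:
--             bestsSoFar[0] = value
--         else:
--             if value > bestsSoFar[-1]:
--                 if len(bestsSoFar) >= numNewBestsToStopAfter:
--                     return value
--                 else: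
--                     bestsSoFar.append(value)
--     return values[-1]
-- ===== SOURCE B (Python) =====
-- def pick_val_after_N_new_bests(values, stoppingPoint, numNewBestsToStopAfter):
--     cut = max(min(stoppingPoint, len(values)), 0)
--     m = max(values[:cut] or values[:1])
--     tail = values[cut:]
--     newBests = [v for i, v in enumerate(tail)
--                 if v > m and all(v > u for u in tail[:i])]
--     k = max(numNewBestsToStopAfter, 1)
--     return newBests[k - 1] if len(newBests) >= k else values[-1]
-- ===== Notes on version B (the rewrite author's own statement) =====
-- stated objective: alternative
-- what changed: Replaces A's stateful one-pass scan with mutating bestsSoFar list by a stateless characterization: the window max via builtin max over the clamped slice, a comprehension that keeps v iff v beats the window max and all earlier tail elements (prefix-maximum property, no running state), and arithmetic selection of the max(nb,1)-th such element.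
import Mathlib
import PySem

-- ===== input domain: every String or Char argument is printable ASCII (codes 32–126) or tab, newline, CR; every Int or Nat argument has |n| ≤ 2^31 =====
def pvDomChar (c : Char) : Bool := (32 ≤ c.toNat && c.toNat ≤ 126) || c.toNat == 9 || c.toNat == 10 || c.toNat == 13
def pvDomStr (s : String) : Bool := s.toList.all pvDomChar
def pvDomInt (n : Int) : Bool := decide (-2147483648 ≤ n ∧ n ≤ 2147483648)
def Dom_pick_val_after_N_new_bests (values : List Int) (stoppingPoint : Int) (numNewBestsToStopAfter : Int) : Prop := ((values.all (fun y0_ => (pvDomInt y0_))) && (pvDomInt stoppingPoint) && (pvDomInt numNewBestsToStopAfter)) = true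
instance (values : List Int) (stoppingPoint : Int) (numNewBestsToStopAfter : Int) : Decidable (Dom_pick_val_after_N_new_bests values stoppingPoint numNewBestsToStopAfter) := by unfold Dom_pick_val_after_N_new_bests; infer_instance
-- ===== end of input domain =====

-- B replaces A's stateful scan (a mutated bestsSoFar list interleaving window max, record and
-- count) by a stateless characterization: builtin max over the clamped window, a comprehension
-- keeping v iff it beats the window max and every earlier tail element, and arithmetic selection
-- of the max(nb,1)-th such element (objective: alternative).

-- ===== PORT A =====
-- enumerate(values), indices starting at k (the port starts it at 0, like Python)
def pvEnumFrom (k : Nat) : List Int → List (Nat × Int)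
  | [] => []
  | v :: rest => (k, v) :: pvEnumFrom (k + 1) rest

-- the for-loop of A; state = bestsSoFar (always nonempty in reachable states)
def pickA_go (stop nb : Int) (vals : List Int) : List (Nat × Int) → List Int → Int
  | [], _ => (PySem.List.pyGet? vals (-1)).getD 0       -- return values[-1]
  | (i, v) :: rest, bests =>
    if (i : Int) < stop ∧ v > bests.headD 0 then        -- bestsSoFar[0] = value
      pickA_go stop nb vals rest (v :: bests.tail)
    else
      if v > bests.getLastD 0 then                      -- value > bestsSoFar[-1]
        if (bests.length : Int) ≥ nb then v             -- return value
        else pickA_go stop nb vals rest (bests ++ [v])  -- bestsSoFar.append(value)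
      else pickA_go stop nb vals rest bests

def pick_val_after_N_new_bests (values : List Int) (stoppingPoint : Int) (numNewBestsToStopAfter : Int) : Int :=
  pickA_go stoppingPoint numNewBestsToStopAfter values (pvEnumFrom 0 values)
    [(PySem.List.pyGet? values 0).getD 0]               -- bestsSoFar = [values[0]]

-- ===== PORT B =====
-- [v for i, v in enumerate(tail) if v > m and all(v > u for u in tail[:i])]
def pickB_newbests (m : Int) (tail : List Int) : List Int :=
  ((PySem.List.enumerate tail).filter
    (fun p => decide (p.2 > m) &&
      (PySem.List.slice tail none (some p.1)).all (fun u => decide (p.2 > u)))).map Prod.snd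

def pick_val_after_N_new_bests_alt (values : List Int) (stoppingPoint : Int) (numNewBestsToStopAfter : Int) : Int :=
  let cut : Nat := (max (min stoppingPoint (values.length : Int)) 0).toNat
  -- m = max(values[:cut] or values[:1])
  let m : Int := (PySem.List.max? (if values.take cut = [] then values.take 1 else values.take cut)
    (fun y => y)).getD 0
  let tail : List Int := values.drop cut
  let newBests : List Int := pickB_newbests m tail
  let k : Int := max numNewBestsToStopAfter 1
  if (newBests.length : Int) ≥ k then (PySem.List.pyGet? newBests (k - 1)).getD 0
  else (PySem.List.pyGet? values (-1)).getD 0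

-- ===== PRECONDITION & SPEC =====
-- A evaluates values[0] unconditionally, so it raises IndexError exactly on the empty list.
def Pre_pick_val_after_N_new_bests (values : List Int) (stoppingPoint : Int) (numNewBestsToStopAfter : Int) : Prop := values ≠ []
instance (values : List Int) (stoppingPoint : Int) (numNewBestsToStopAfter : Int) : Decidable (Pre_pick_val_after_N_new_bests values stoppingPoint numNewBestsToStopAfter) := by unfold Pre_pick_val_after_N_new_bests; infer_instance
def pvWitness_pick_val_after_N_new_bests : List Int × Int × Int := ([3, 1, 4, 1, 5], 2, 2)

def Spec_pick_val_after_N_new_bests (values : List Int) (stoppingPoint : Int) (numNewBestsToStopAfter : Int) (out : Int) : Prop := out = pick_val_after_N_new_bests_alt values stoppingPoint numNewBestsToStopAfter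
instance (values : List Int) (stoppingPoint : Int) (numNewBestsToStopAfter : Int) (out : Int) : Decidable (Spec_pick_val_after_N_new_bests values stoppingPoint numNewBestsToStopAfter out) := by unfold Spec_pick_val_after_N_new_bests; infer_instance

-- ===== CLAIM (what is proved, stated in full; the proofs are below) =====
def Claim_equal_pick_val_after_N_new_bests : Prop := ∀ (values : List Int) (stoppingPoint : Int) (numNewBestsToStopAfter : Int), Dom_pick_val_after_N_new_bests values stoppingPoint numNewBestsToStopAfter → Pre_pick_val_after_N_new_bests values stoppingPoint numNewBestsToStopAfter → Spec_pick_val_after_N_new_bests values stoppingPoint numNewBestsToStopAfter (pick_val_after_N_new_bests values stoppingPoint numNewBestsToStopAfter)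

-- ===== LEMMAS AND PROOFS =====

-- proof-side intermediate: the scalar record/count reading of A's post-stopping loop
def pickB_scan (nb last : Int) : List Int → Int → Int → Int
  | [], _, _ => last
  | v :: rest, record, count =>
    if v > record then
      if count ≥ nb then v
      else pickB_scan nb last rest v (count + 1)
    else pickB_scan nb last rest record count

-- proof-side intermediate: the running-record list of new bests
def nbF (r : Int) : List Int → List Int
  | [] => []
  | v :: t => if v > r then v :: nbF v t else nbF r t

-- Phase 2: once all remaining indices are ≥ stop, A's loop only looks at the last element and
-- the length of bestsSoFar; that is exactly the (record, count) scan.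
theorem pickA_go_phase2 (stop nb : Int) (vals : List Int) :
    ∀ (rest : List Int) (k : Nat) (bests : List Int), stop ≤ (k : Int) →
      pickA_go stop nb vals (pvEnumFrom k rest) bests =
        pickB_scan nb ((PySem.List.pyGet? vals (-1)).getD 0) rest (bests.getLastD 0) (bests.length : Int) := by
  intro rest
  induction rest with
  | nil => intro k bests _; simp [pvEnumFrom, pickA_go, pickB_scan]
  | cons v t ih =>
    intro k bests hk
    have hcond : ¬ ((k : Int) < stop ∧ v > bests.headD 0) := by
      rintro ⟨h, _⟩; omega
    simp only [pvEnumFrom, pickA_go, pickB_scan, if_neg hcond]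
    by_cases hv : v > bests.getLastD 0
    · simp only [if_pos hv]
      by_cases hn : (bests.length : Int) ≥ nb
      · simp [hn]
      · simp only [if_neg hn]
        rw [ih (k + 1) (bests ++ [v]) (by push_cast; omega)]
        simp
    · simp only [if_neg hv]
      exact ih (k + 1) bests (by push_cast; omega)

-- Phase 1: while indices are below stop, bestsSoFar stays the singleton holding the running max
-- of the window; the whole loop equals "fold max over the window, then the phase-2 scan".
theorem pickA_go_phase1 (stop nb : Int) (vals : List Int) :
    ∀ (rest : List Int) (k : Nat) (b : Int),
      pickA_go stop nb vals (pvEnumFrom k rest) [b] =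
        pickB_scan nb ((PySem.List.pyGet? vals (-1)).getD 0)
          (rest.drop ((stop - (k : Int)).toNat))
          ((rest.take ((stop - (k : Int)).toNat)).foldl (fun a x => if x > a then x else a) b) 1 := by
  intro rest
  induction rest with
  | nil => intro k b; simp [pvEnumFrom, pickA_go, pickB_scan]
  | cons v t ih =>
    intro k b
    by_cases hk : stop ≤ (k : Int)
    · have hz : (stop - (k : Int)).toNat = 0 := by omega
      rw [hz]
      simpa using pickA_go_phase2 stop nb vals (v :: t) k [b] hk
    · have hpos : (stop - (k : Int)).toNat = (stop - ((k : Int) + 1)).toNat + 1 := by omega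
      have hstep : pickA_go stop nb vals (pvEnumFrom k (v :: t)) [b] =
          pickA_go stop nb vals (pvEnumFrom (k + 1) t) [if v > b then v else b] := by
        simp only [pvEnumFrom, pickA_go]
        by_cases hv : v > b
        · simp [hv, not_le.mp hk]
        · have hc : ¬ ((k : Int) < stop ∧ v > ([b] : List Int).headD 0) := by
            simp [List.headD]; intro _; simpa using hv
          simp only [if_neg hc]
          simp [List.getLastD, hv]
      rw [hstep, ih (k + 1) (if v > b then v else b)]
      rw [hpos]
      simp [List.take_succ_cons, List.drop_succ_cons, List.foldl_cons]

-- The scan returns the (nb - c + 1)-th element of the running-record list (0-based (nb-c).toNat),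
-- or last if there is none.
theorem pickB_scan_eq_get (nb last : Int) :
    ∀ (tail : List Int) (r c : Int),
      pickB_scan nb last tail r c = ((nbF r tail)[(nb - c).toNat]?).getD last := by
  intro tail
  induction tail with
  | nil => intro r c; simp [pickB_scan, nbF]
  | cons v t ih =>
    intro r c
    by_cases hv : v > r
    · simp only [pickB_scan, nbF, if_pos hv]
      by_cases hc : c ≥ nb
      · have h0 : (nb - c).toNat = 0 := by omega
        simp [hc, h0]
      · have hpos : (nb - c).toNat = (nb - (c + 1)).toNat + 1 := by omega
        rw [if_neg hc, ih v (c + 1), hpos]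
        simp
    · simp only [pickB_scan, nbF, if_neg hv]
      exact ih r c

-- v beats the fold-max of a prefix iff it beats the seed and every prefix element
theorem foldl_max_lt_iff : ∀ (pre : List Int) (m v : Int),
    pre.foldl max m < v ↔ m < v ∧ ∀ u ∈ pre, u < v := by
  intro pre
  induction pre with
  | nil => intro m v; simp
  | cons a t ih =>
    intro m v
    rw [List.foldl_cons, ih]
    simp only [max_lt_iff, List.mem_cons]
    constructor
    · rintro ⟨⟨hm, ha⟩, ht⟩
      refine ⟨hm, ?_⟩
      rintro u (rfl | hu)
      · exact ha
      · exact ht u hu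
    · rintro ⟨hm, h⟩
      exact ⟨⟨hm, h a (Or.inl rfl)⟩, fun u hu => h u (Or.inr hu)⟩

-- B's stateless comprehension, generalized over an already-seen prefix, equals the
-- running-record list seeded with the prefix max.
theorem pickB_gen : ∀ (t pre : List Int) (m : Int),
    ((PySem.List.enumerate t (pre.length : Int)).filter
      (fun p => decide (p.2 > m) &&
        (PySem.List.slice (pre ++ t) none (some p.1)).all (fun u => decide (p.2 > u)))).map Prod.snd
    = nbF (pre.foldl max m) t := by
  intro t
  induction t with
  | nil => intro pre m; simp [PySem.List.enumerate_nil, nbF]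
  | cons v t ih =>
    intro pre m
    rw [PySem.List.enumerate_cons, List.filter_cons]
    have hsl : PySem.List.slice (pre ++ v :: t) none (some ((pre.length : Nat) : Int)) = pre := by
      rw [PySem.List.slice_to_natCast]
      exact List.take_left
    have hhead : (decide (v > m) &&
        (PySem.List.slice (pre ++ v :: t) none (some ((pre.length : Nat) : Int))).all
          (fun u => decide (v > u))) = decide (pre.foldl max m < v) := by
      rw [hsl, Bool.eq_iff_iff]
      simp only [Bool.and_eq_true, decide_eq_true_eq, List.all_eq_true, foldl_max_lt_iff]
    have htail :
        ((PySem.List.enumerate t ((pre.length : Int) + 1)).filter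
          (fun p => decide (p.2 > m) &&
            (PySem.List.slice (pre ++ v :: t) none (some p.1)).all
              (fun u => decide (p.2 > u)))).map Prod.snd
        = nbF (max (pre.foldl max m) v) t := by
      have hlen : ((pre ++ [v]).length : Int) = (pre.length : Int) + 1 := by
        simp
      have happ : pre ++ v :: t = (pre ++ [v]) ++ t := by simp
      rw [← hlen, happ, ih (pre ++ [v]) m, List.foldl_append]
      simp
    rw [hhead]
    by_cases hb : pre.foldl max m < v
    · simp only [hb, decide_true, if_true, List.map_cons, htail, nbF,
        max_eq_right (le_of_lt hb)]
    · simp only [hb, decide_false, Bool.false_eq_true, if_false, htail, nbF,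
        max_eq_left (not_lt.mp hb)]

theorem pickB_newbests_eq (m : Int) (tail : List Int) :
    pickB_newbests m tail = nbF m tail := by
  have h := pickB_gen tail [] m
  simpa [pickB_newbests] using h

-- the builtin max over the (nonempty-patched) window equals A's phase-1 running max
theorem window_max_eq (h : Int) (t : List Int) (cut : Nat) :
    (PySem.List.max? (if (h :: t).take cut = [] then (h :: t).take 1 else (h :: t).take cut)
      (fun y => y)).getD 0
    = ((h :: t).take cut).foldl (fun a x => if x > a then x else a)
        ((PySem.List.pyGet? (h :: t) 0).getD 0) := by
  have hf : (fun a x : Int => if x > a then x else a) = (fun a x : Int => max a x) := by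
    funext a x; rw [max_def]; split_ifs <;> omega
  cases cut with
  | zero => simp [PySem.List.max?_id_cons]
  | succ n =>
    have hne : (h :: t.take n) ≠ [] := by simp
    simp only [List.take_succ_cons, if_neg hne, PySem.List.max?_id_cons,
      PySem.List.pyGet?_zero_cons, Option.getD_some, List.foldl_cons, hf]
    rw [max_self]

-- ===== VERDICT (by name: the statement is the Claim_ definition above) =====
theorem pick_val_after_N_new_bests_spec : Claim_equal_pick_val_after_N_new_bests := by
  intro values stop nb _ hne
  unfold Spec_pick_val_after_N_new_bests pick_val_after_N_new_bests pick_val_after_N_new_bests_alt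
  rw [pickA_go_phase1 stop nb values values 0 ((PySem.List.pyGet? values 0).getD 0)]
  simp only [Nat.cast_zero, sub_zero]
  obtain ⟨h, t, rfl⟩ := List.exists_cons_of_ne_nil hne
  set cut : Nat := (max (min stop ((h :: t).length : Int)) 0).toNat with hcut
  have htake : (h :: t).take stop.toNat = (h :: t).take cut ∧
      (h :: t).drop stop.toNat = (h :: t).drop cut := by
    by_cases hcase : stop.toNat = cut
    · rw [hcase]; exact ⟨rfl, rfl⟩
    · have h1 : (h :: t).length ≤ stop.toNat := by omega
      have h2 : (h :: t).length ≤ cut := by omega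
      rw [List.take_of_length_le h1, List.take_of_length_le h2,
        List.drop_of_length_le h1, List.drop_of_length_le h2]
      exact ⟨rfl, rfl⟩
  rw [htake.1, htake.2, pickB_scan_eq_get, ← window_max_eq h t cut, pickB_newbests_eq]
  set L : List Int := nbF
    ((PySem.List.max? (if (h :: t).take cut = [] then (h :: t).take 1 else (h :: t).take cut)
      (fun y => y)).getD 0) ((h :: t).drop cut) with hL
  set j : Nat := (nb - 1).toNat with hj
  have hk1 : max nb 1 - 1 = (j : Int) := by omega
  rw [hk1, PySem.List.pyGet?_natCast]
  by_cases hlen : (L.length : Int) ≥ max nb 1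
  · rw [if_pos hlen]
    have hjl : j < L.length := by omega
    simp [List.getElem?_eq_getElem hjl]
  · rw [if_neg hlen]
    have hjl : L.length ≤ j := by omega
    simp [List.getElem?_eq_none hjl]
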